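-- pv_equiv track=rewrite | github.com/Secrettestbot/Super-board-game-game | games/tsuro.py | _rotate_connections
-- ===== SOURCE A (Python) =====
-- def _rotate_connections(connections, times=1):
--     """Rotate tile connections 90 degrees clockwise, 'times' times."""
--     result = [list(pair) for pair in connections]
--     for _ in range(times):
--         new_result = []
--         for a, b in result:
--             ra = (a + 2) % 8
--             rb = (b + 2) % 8
--             new_result.append([min(ra, rb), max(ra, rb)])
--         result = sorted(new_result)
--     return result
-- ===== SOURCE B (Python) =====
-- def _rotate_connections(connections, times=1):
--     """Rotate tile connections 90 degrees clockwise, 'times' times."""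
--     if times <= 0:
--         return [list(pair) for pair in connections]
--     s = (2 * times) % 8
--     return sorted([min((a + s) % 8, (b + s) % 8), max((a + s) % 8, (b + s) % 8)]
--                   for a, b in connections)
-- ===== Notes on version B (the rewrite author's own statement) =====
-- stated objective: faster
-- what changed: Replaces the times-fold loop (each pass shifting every pair by 2 mod 8 and re-sorting) by one closed-form shift of (2*times) % 8 applied to each pair followed by a single sort; times <= 0 returns the plain copy exactly as the empty loop does.
import Mathlib
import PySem

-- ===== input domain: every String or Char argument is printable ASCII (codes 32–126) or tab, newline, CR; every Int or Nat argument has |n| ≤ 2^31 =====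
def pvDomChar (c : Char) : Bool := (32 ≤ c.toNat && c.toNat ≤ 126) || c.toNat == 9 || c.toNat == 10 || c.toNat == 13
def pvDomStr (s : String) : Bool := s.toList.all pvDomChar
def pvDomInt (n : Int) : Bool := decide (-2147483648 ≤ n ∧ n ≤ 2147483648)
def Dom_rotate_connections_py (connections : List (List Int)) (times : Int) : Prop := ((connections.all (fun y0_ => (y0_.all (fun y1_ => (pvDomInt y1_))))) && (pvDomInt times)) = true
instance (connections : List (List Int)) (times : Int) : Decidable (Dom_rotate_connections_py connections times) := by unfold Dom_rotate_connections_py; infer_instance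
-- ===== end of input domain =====

-- B replaces A's times-fold rotate-and-resort loop by one closed-form shift of (2*times) % 8 and a single sort (asymptotically faster in times).


-- ===== PORT A =====
-- one pass of A's loop body: shift each pair by +2 mod 8, normalise to [min,max], then sort.
-- The '_ => new_result' branch is unreachable under Pre_ (Python raises ValueError unpacking a non-pair).
def pyStepA (result : List (List Int)) : List (List Int) :=
  PySem.List.sorted
    (result.foldl (fun new_result p =>
      match p with
      | [a, b] =>
        let ra := PySem.Int.mod (a + 2) 8
        let rb := PySem.Int.mod (b + 2) 8
        new_result ++ [[min ra rb, max ra rb]]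
      | _ => new_result) [])
    (fun x => x) false

def rotate_connections_py (connections : List (List Int)) (times : Int) : List (List Int) :=
  (PySem.List.pyRange 0 times 1).foldl (fun result _ => pyStepA result)
    (connections.map (fun pair => pair))

-- ===== PORT B =====
-- The '_ => p' branch is unreachable under Pre_ (Python raises ValueError unpacking a non-pair).
def rotate_connections_py_alt (connections : List (List Int)) (times : Int) : List (List Int) :=
  if times ≤ 0 then connections.map (fun pair => pair)
  else
    let s := PySem.Int.mod (2 * times) 8
    PySem.List.sorted
      (connections.map (fun p =>
        match p with
        | [a, b] => [min (PySem.Int.mod (a + s) 8) (PySem.Int.mod (b + s) 8),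
                     max (PySem.Int.mod (a + s) 8) (PySem.Int.mod (b + s) 8)]
        | _ => p))
      (fun x => x) false

-- ===== PRECONDITION & SPEC =====
-- Pre_ excludes exactly the inputs where Python raises: times > 0 with some inner list not of
-- length 2 — both A and B then raise ValueError unpacking 'for a, b in …'.
def Pre_rotate_connections_py (connections : List (List Int)) (times : Int) : Prop :=
  times ≤ 0 ∨ ∀ p ∈ connections, p.length = 2
instance (connections : List (List Int)) (times : Int) : Decidable (Pre_rotate_connections_py connections times) := by unfold Pre_rotate_connections_py; infer_instance

def pvWitness_rotate_connections_py : List (List Int) × Int := ([[0, 5], [1, 4], [2, 7]], 3)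

def Spec_rotate_connections_py (connections : List (List Int)) (times : Int) (out : List (List Int)) : Prop := out = rotate_connections_py_alt connections times
instance (connections : List (List Int)) (times : Int) (out : List (List Int)) : Decidable (Spec_rotate_connections_py connections times out) := by unfold Spec_rotate_connections_py; infer_instance

-- ===== CLAIM (what is proved, stated in full; the proofs are below) =====
def Claim_equal_rotate_connections_py : Prop := ∀ (connections : List (List Int)) (times : Int), Dom_rotate_connections_py connections times → Pre_rotate_connections_py connections times → Spec_rotate_connections_py connections times (rotate_connections_py connections times)

-- ===== LEMMAS AND PROOFS =====

-- shift a well-formed pair by s (proof-side normal form for both ports' pair bodies)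
def pvShift (s : Int) (p : List Int) : List Int :=
  match p with
  | [a, b] => [min (PySem.Int.mod (a + s) 8) (PySem.Int.mod (b + s) 8),
               max (PySem.Int.mod (a + s) 8) (PySem.Int.mod (b + s) 8)]
  | _ => p

lemma pvShift_length (s : Int) (p : List Int) (hp : p.length = 2) :
    (pvShift s p).length = 2 := by
  match p, hp with
  | [a, b], _ => rfl

-- one A-step applied after a shift-by-s image is the shift-by-(s+2) image
lemma pvShift_step (s : Int) (p : List Int) (hp : p.length = 2) :
    pvShift 2 (pvShift s p) = pvShift (s + 2) p := by
  match p, hp with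
  | [a, b], _ =>
    simp only [pvShift]
    have hm : ∀ x : Int, PySem.Int.mod x 8 = x % 8 :=
      fun x => PySem.Int.mod_eq_emod_of_pos (a := x) (b := 8) (by norm_num)
    have hA : PySem.Int.mod (PySem.Int.mod (a + s) 8 + 2) 8 = PySem.Int.mod (a + (s + 2)) 8 := by
      simp only [hm]; omega
    have hB : PySem.Int.mod (PySem.Int.mod (b + s) 8 + 2) 8 = PySem.Int.mod (b + (s + 2)) 8 := by
      simp only [hm]; omega
    rcases le_total (PySem.Int.mod (a + s) 8) (PySem.Int.mod (b + s) 8) with h | h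
    · rw [min_eq_left h, max_eq_right h, hA, hB]
    · rw [min_eq_right h, max_eq_left h, hB, hA, min_comm, max_comm]

-- the inner foldl of A's step is a map of pvShift 2 (on well-formed inputs)
lemma pyStepA_foldl (xs : List (List Int)) (h2 : ∀ p ∈ xs, p.length = 2) :
    xs.foldl (fun new_result p =>
      match p with
      | [a, b] =>
        let ra := PySem.Int.mod (a + 2) 8
        let rb := PySem.Int.mod (b + 2) 8
        new_result ++ [[min ra rb, max ra rb]]
      | _ => new_result) [] = xs.map (pvShift 2) := by
  have key : ∀ (acc : List (List Int)), xs.foldl (fun new_result p =>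
      match p with
      | [a, b] =>
        let ra := PySem.Int.mod (a + 2) 8
        let rb := PySem.Int.mod (b + 2) 8
        new_result ++ [[min ra rb, max ra rb]]
      | _ => new_result) acc = acc ++ xs.map (pvShift 2) := by
    induction xs with
    | nil => simp
    | cons p t ih =>
      intro acc
      have hp := h2 p (by simp)
      match p, hp with
      | [a, b], _ =>
        simp only [List.foldl_cons, List.map_cons]
        rw [ih (fun q hq => h2 q (by simp [hq]))]
        simp [pvShift]
  simpa using key []

lemma pyStepA_of_shape (xs : List (List Int)) (h2 : ∀ p ∈ xs, p.length = 2) :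
    pyStepA xs = PySem.List.sorted (xs.map (pvShift 2)) (fun x => x) false := by
  unfold pyStepA; rw [pyStepA_foldl xs h2]

-- sorting with the identity key only depends on the multiset (bridging the
-- elaborated LT/Decidable instances to the LinearOrder ones, which are defeq)
lemma sorted_perm_congr (xs ys : List (List Int)) (h : xs.Perm ys) :
    PySem.List.sorted xs (fun x => x) false = PySem.List.sorted ys (fun x => x) false := by
  have hinst : ∀ zs : List (List Int),
      PySem.List.sorted zs (fun x => x) false
        = @PySem.List.sorted (List Int) (List Int) List.instLinearOrder.toLT
            LinearOrder.toDecidableLT zs (fun x => x) false :=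
    fun zs => congrArg (fun d => @PySem.List.sorted (List Int) (List Int) List.instLT d zs (fun x => x) false)
      (funext fun a => funext fun b => Subsingleton.elim _ _)
  rw [hinst xs, hinst ys]
  exact PySem.List.sorted_eq_sorted_of_perm xs ys (fun x => x) (fun _ _ h => h) h

-- n ≥ 1 iterations of A's step = one sort of the (2n)-shift image
lemma pyStepA_iter (conns : List (List Int)) (h2 : ∀ p ∈ conns, p.length = 2) :
    ∀ n : Nat, pyStepA^[n + 1] conns
      = PySem.List.sorted (conns.map (pvShift (2 * (n + 1)))) (fun x => x) false := by
  intro n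
  induction n with
  | zero =>
    simp only [Nat.zero_add, Function.iterate_one]
    rw [pyStepA_of_shape conns h2]; norm_num
  | succ k ih =>
    rw [Function.iterate_succ_apply', ih]
    have hshape : ∀ p ∈ PySem.List.sorted (conns.map (pvShift (2 * (k + 1)))) (fun x => x) false,
        p.length = 2 := by
      intro p hp
      rw [PySem.List.mem_sorted] at hp
      obtain ⟨q, hq, rfl⟩ := List.mem_map.mp hp
      exact pvShift_length _ q (h2 q hq)
    rw [pyStepA_of_shape _ hshape]
    have hperm : (PySem.List.sorted (conns.map (pvShift (2 * (k + 1)))) (fun x => x) false).map (pvShift 2)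
        |>.Perm ((conns.map (pvShift (2 * (k + 1)))).map (pvShift 2)) :=
      (PySem.List.sorted_perm _ _ _).map _
    rw [sorted_perm_congr _ _ hperm]
    congr 1
    rw [List.map_map]
    apply List.map_congr_left
    intro p hp
    have := pvShift_step (2 * ((k : Int) + 1)) p (h2 p hp)
    simpa [Function.comp] using this.trans (by ring_nf)

-- the (2n)-shift equals the ((2n) % 8)-shift pairwise
lemma pvShift_mod (s : Int) (p : List Int) :
    pvShift s p = pvShift (PySem.Int.mod s 8) p := by
  match p with
  | [a, b] =>
    simp only [pvShift]
    have h : ∀ x : Int, PySem.Int.mod (x + s) 8 = PySem.Int.mod (x + PySem.Int.mod s 8) 8 := by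
      intro x
      simp only [PySem.Int.mod_eq_emod_of_pos (b := (8:Int)) (by omega)]
      omega
    rw [h a, h b]
  | [] => rfl
  | [_] => rfl
  | _ :: _ :: _ :: _ => rfl

-- A's foldl over range(times) is iteration of pyStepA, times.toNat times
lemma foldl_const_iterate {α β : Type} (f : α → α) :
    ∀ (l : List β) (init : α), l.foldl (fun r _ => f r) init = f^[l.length] init := by
  intro l
  induction l with
  | nil => intro init; simp
  | cons x t ih => intro init; simp [ih, Function.iterate_succ_apply]

lemma foldl_pyRange_iterate (times : Int) (init : List (List Int)) :
    (PySem.List.pyRange 0 times 1).foldl (fun result _ => pyStepA result) init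
      = pyStepA^[times.toNat] init := by
  rw [foldl_const_iterate, PySem.List.length_pyRange_one]
  norm_num

-- ===== VERDICT (by name: the statement is the Claim_ definition above) =====
theorem rotate_connections_py_spec : Claim_equal_rotate_connections_py := by
  intro conns times _hdom hpre
  unfold Spec_rotate_connections_py rotate_connections_py rotate_connections_py_alt
  by_cases ht : times ≤ 0
  · rw [if_pos ht, PySem.List.pyRange_one_eq_nil ht]
    simp
  · rw [if_neg ht]
    rw [not_le] at ht
    rcases hpre with h | h2
    · omega
    rw [foldl_pyRange_iterate]
    have hmap : conns.map (fun pair => pair) = conns := by simp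
    rw [hmap]
    obtain ⟨n, hn⟩ : ∃ n : Nat, times.toNat = n + 1 := ⟨times.toNat - 1, by omega⟩
    rw [hn, pyStepA_iter conns h2 n]
    have hcast : (2 * ((n : Int) + 1)) = 2 * times := by
      have : ((n : Int) + 1) = times := by omega
      rw [this]
    rw [hcast]
    congr 1
    apply List.map_congr_left
    intro p hp
    match p, h2 p hp with
    | [a, b], _ => exact pvShift_mod (2 * times) [a, b]
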